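-- pv_equiv track=rewrite | github.com/avidLearnerInProgress/cf-octo-journey | old_attempts/1038a.py | equality
-- ===== SOURCE A (Python) =====
-- from collections import Counter
--
-- def equality(s, n, k):
--     if s is None: return 0
--     unq= set(s)
--     if len(unq) != k:
--         return 0
--     vl = list(Counter(s).values())
--     minCount = min(vl)
--
--     for i in range(k):
--         minCount = min(vl[i], minCount)
--
--     minCount *= k
--     return minCount
-- ===== SOURCE B (Python) =====
-- def equality(s, n, k):
--     if s is None:
--         return 0
--     if len(set(s)) != k:
--         return 0
--     # Peel layers: each round removes the first occurrence of every character
--     # present; the number of full rounds (all k chars present) is the minimum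
--     # frequency, so the answer is rounds * k.  No frequency table is built.
--     chars = list(s)
--     rounds = 0
--     while chars and len(set(chars)) == k:
--         seen = set()
--         rest = []
--         for c in chars:
--             if c in seen:
--                 rest.append(c)
--             else:
--                 seen.add(c)
--         chars = rest
--         rounds += 1
--     return rounds * k
-- ===== Notes on version B (the rewrite author's own statement) =====
-- stated objective: alternative
-- what changed: B builds no frequency table at all: it repeatedly peels one layer (a single pass dropping the first occurrence of every character) and counts full rounds; the number of rounds in which all k characters are present is the minimum frequency, so it returns rounds * k.
import Mathlib
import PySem

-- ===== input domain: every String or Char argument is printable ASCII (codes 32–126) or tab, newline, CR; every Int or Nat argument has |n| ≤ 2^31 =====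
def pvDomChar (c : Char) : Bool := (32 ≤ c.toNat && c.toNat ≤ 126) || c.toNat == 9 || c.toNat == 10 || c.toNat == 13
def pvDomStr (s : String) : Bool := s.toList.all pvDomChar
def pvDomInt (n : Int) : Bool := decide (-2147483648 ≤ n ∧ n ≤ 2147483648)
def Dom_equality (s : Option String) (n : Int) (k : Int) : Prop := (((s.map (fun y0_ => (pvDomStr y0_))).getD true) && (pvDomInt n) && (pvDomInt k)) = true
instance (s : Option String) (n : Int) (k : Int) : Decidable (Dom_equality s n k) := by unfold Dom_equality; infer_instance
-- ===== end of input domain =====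

-- B replaces A's Counter frequency table (plus redundant second min-loop) with a counting-free
-- layer-peeling loop: each round drops the first occurrence of every character; the number of
-- full rounds is the minimum frequency. Return values agree everywhere A returns.

-- ===== PORT A =====
def equality (s : Option String) (n : Int) (k : Int) : Int :=
  match s with
  | none => 0
  | some str =>
    let unq : List Char := PySem.Set.ofList str.toList
    if (unq.length : Int) ≠ k then 0
    else
      let vl : List Int := (PySem.Dict.counter str.toList).values
      match PySem.List.min? vl (fun x => x) with
      | none => 0   -- Python's min(vl) raises ValueError here (s = "" with k = 0): excluded by Pre_equality
      | some m0 =>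
        (PySem.List.pyRange 0 k).foldl (fun m i => min (PySem.List.pyGetD vl i 0) m) m0 * k

-- ===== PORT B =====
-- the inner `for c in chars` pass: keep a char iff it was already seen (drops first occurrences)
def peelGo (seen : PySem.Set Char) : List Char → List Char
  | [] => []
  | c :: rest =>
      if c ∈ seen then c :: peelGo seen rest
      else peelGo (PySem.Set.add seen c) rest

-- termination of the while-loop: one peel strictly shrinks a nonempty list
theorem peelGo_length_le (seen : PySem.Set Char) (cs : List Char) :
    (peelGo seen cs).length ≤ cs.length := by
  induction cs generalizing seen with
  | nil => simp [peelGo]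
  | cons c rest ih =>
    simp only [peelGo]
    split
    · simpa using Nat.succ_le_succ (ih seen)
    · exact Nat.le_succ_of_le (ih _)

theorem peel_length_lt (cs : List Char) (h : cs ≠ []) :
    (peelGo PySem.Set.empty cs).length < cs.length := by
  match cs with
  | [] => exact absurd rfl h
  | c :: rest =>
    have : c ∉ PySem.Set.empty := by simp [PySem.Set.empty]
    simp only [peelGo, if_neg this]
    exact Nat.lt_succ_of_le (peelGo_length_le _ rest)

-- the while-loop: peel while the list is nonempty and still has k distinct chars
def peelLoop (cs : List Char) (k : Int) (rounds : Int) : Int :=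
  if h : cs ≠ [] ∧ ((PySem.Set.ofList cs).length : Int) = k then
    peelLoop (peelGo PySem.Set.empty cs) k (rounds + 1)
  else rounds
termination_by cs.length
decreasing_by exact peel_length_lt cs h.1

def equality_alt (s : Option String) (n : Int) (k : Int) : Int :=
  match s with
  | none => 0
  | some str =>
    if ((PySem.Set.ofList str.toList).length : Int) ≠ k then 0
    else peelLoop str.toList k 0 * k

-- ===== PRECONDITION & SPEC =====
-- Pre_ excludes exactly s = "" with k = 0, the one input where A's min(vl) raises ValueError.
def Pre_equality (s : Option String) (n : Int) (k : Int) : Prop := ¬ (s = some "" ∧ k = 0)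
instance (s : Option String) (n : Int) (k : Int) : Decidable (Pre_equality s n k) := by unfold Pre_equality; infer_instance
def pvWitness_equality : Option String × Int × Int := (some "aab", 0, 2)
def Spec_equality (s : Option String) (n : Int) (k : Int) (out : Int) : Prop := out = equality_alt s n k
instance (s : Option String) (n : Int) (k : Int) (out : Int) : Decidable (Spec_equality s n k out) := by unfold Spec_equality; infer_instance

-- ===== CLAIM (what is proved, stated in full; the proofs are below) =====
def Claim_equal_equality : Prop := ∀ (s : Option String) (n : Int) (k : Int), Dom_equality s n k → Pre_equality s n k → Spec_equality s n k (equality s n k)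

-- ===== LEMMAS AND PROOFS =====

-- one peel drops exactly one occurrence of each not-yet-seen character
theorem count_peelGo (cs : List Char) : ∀ (seen : PySem.Set Char) (d : Char),
    (peelGo seen cs).count d = cs.count d - (if d ∈ cs ∧ d ∉ seen then 1 else 0) := by
  induction cs with
  | nil => intro seen d; simp [peelGo]
  | cons c rest ih =>
    intro seen d
    simp only [peelGo]
    by_cases hcs : c ∈ seen
    · rw [if_pos hcs]
      by_cases hdc : d = c
      · subst hdc
        have : ¬ (d ∈ d :: rest ∧ d ∉ seen) := fun h => h.2 hcs
        rw [if_neg this, List.count_cons_self, List.count_cons_self, ih seen d]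
        have : ¬ (d ∈ rest ∧ d ∉ seen) := fun h => h.2 hcs
        rw [if_neg this]
        omega
      · rw [List.count_cons_of_ne (Ne.symm hdc), List.count_cons_of_ne (Ne.symm hdc), ih seen d]
        have : (d ∈ c :: rest ∧ d ∉ seen) ↔ (d ∈ rest ∧ d ∉ seen) := by
          constructor
          · rintro ⟨hm, hs⟩
            exact ⟨(List.mem_cons.mp hm).resolve_left hdc, hs⟩
          · rintro ⟨hm, hs⟩
            exact ⟨List.mem_cons_of_mem _ hm, hs⟩
        simp only [this]
    · rw [if_neg hcs, ih (PySem.Set.add seen c) d]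
      by_cases hdc : d = c
      · subst hdc
        have h1 : ¬ (d ∈ rest ∧ d ∉ PySem.Set.add seen d) := by
          rintro ⟨_, hna⟩
          exact hna ((PySem.Set.mem_add seen d d).mpr (Or.inr rfl))
        have h2 : d ∈ d :: rest ∧ d ∉ seen := ⟨List.mem_cons_self, hcs⟩
        rw [if_neg h1, if_pos h2, List.count_cons_self]
        have : 1 ≤ rest.count d + 1 := Nat.le_add_left 1 _
        omega
      · have hmemadd : d ∈ PySem.Set.add seen c ↔ d ∈ seen := by
          rw [PySem.Set.mem_add]
          exact ⟨fun h => h.resolve_right hdc, Or.inl⟩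
        have hmc : d ∈ c :: rest ↔ d ∈ rest := by
          constructor
          · intro h; exact (List.mem_cons.mp h).resolve_left hdc
          · exact List.mem_cons_of_mem _
        rw [List.count_cons_of_ne (Ne.symm hdc)]
        simp only [hmemadd, hmc]

theorem count_peel (cs : List Char) (d : Char) :
    (peelGo PySem.Set.empty cs).count d = cs.count d - (if d ∈ cs then 1 else 0) := by
  rw [count_peelGo cs PySem.Set.empty d]
  have : (d ∈ cs ∧ d ∉ PySem.Set.empty) ↔ d ∈ cs := by
    simp [PySem.Set.empty]
  simp only [this]

theorem mem_peel (cs : List Char) (d : Char) :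
    d ∈ peelGo PySem.Set.empty cs ↔ 2 ≤ cs.count d := by
  rw [← List.count_pos_iff, count_peel]
  by_cases h : d ∈ cs
  · rw [if_pos h]; omega
  · rw [if_neg h]
    have : cs.count d = 0 := List.count_eq_zero.mpr h
    omega

-- the main loop invariant: starting from a nonempty list whose minimum frequency is m,
-- the loop runs exactly m more rounds
theorem peelLoop_eq : ∀ (N : Nat) (cs : List Char), cs.length ≤ N → cs ≠ [] →
    ∀ (m r : Int),
    PySem.List.min? ((PySem.Set.ofList cs).map (fun c => (cs.count c : Int))) (fun x => x) = some m →
    peelLoop cs ((PySem.Set.ofList cs).length : Int) r = r + m := by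
  intro N
  induction N with
  | zero =>
    intro cs hlen hne
    exact absurd (List.eq_nil_of_length_eq_zero (Nat.le_zero.mp hlen)) hne
  | succ N ih =>
    intro cs hlen hne m r hmin
    -- facts from min?
    have hmem := PySem.List.min?_mem hmin
    have hlb := PySem.List.min?_isMin hmin
    rcases List.mem_map.mp hmem with ⟨cstar, hcstar, hmval⟩
    have hcstar_cs : cstar ∈ cs := (PySem.Set.mem_ofList _ _).mp hcstar
    have hlb' : ∀ c ∈ cs, m ≤ (cs.count c : Int) := by
      intro c hc
      exact hlb _ (List.mem_map.mpr ⟨c, (PySem.Set.mem_ofList _ _).mpr hc, rfl⟩)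
    have hm1 : 1 ≤ m := by
      rw [← hmval]
      exact_mod_cast List.count_pos_iff.mpr hcstar_cs
    -- unfold one loop step
    rw [peelLoop, dif_pos ⟨hne, rfl⟩]
    set P := peelGo PySem.Set.empty cs with hP
    have hPlt : P.length < cs.length := peel_length_lt cs hne
    by_cases hm : m = 1
    · -- last round: cstar disappears, the distinct-set shrinks, the next test fails
      subst hm
      have hcount1 : cs.count cstar = 1 := by
        have h2 : (cs.count cstar : Int) = 1 := hmval
        exact_mod_cast h2
      have hnotP : cstar ∉ P := by
        rw [mem_peel]; omega
      have hsub : ∀ d ∈ PySem.Set.ofList P, d ∈ PySem.Set.ofList cs := by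
        intro d hd
        have hdP : d ∈ P := (PySem.Set.mem_ofList _ _).mp hd
        have : 2 ≤ cs.count d := (mem_peel cs d).mp hdP
        exact (PySem.Set.mem_ofList _ _).mpr (List.count_pos_iff.mp (by omega))
      have hlt : (PySem.Set.ofList P).length < (PySem.Set.ofList cs).length := by
        have hssub : (PySem.Set.ofList P).toFinset ⊂ (PySem.Set.ofList cs).toFinset := by
          constructor
          · intro d hd
            exact List.mem_toFinset.mpr (hsub d (List.mem_toFinset.mp hd))
          · intro hsup
            have : cstar ∈ (PySem.Set.ofList P).toFinset :=
              hsup (List.mem_toFinset.mpr ((PySem.Set.mem_ofList _ _).mpr hcstar_cs))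
            exact hnotP ((PySem.Set.mem_ofList _ _).mp (List.mem_toFinset.mp this))
        have h1 := Finset.card_lt_card hssub
        rwa [List.toFinset_card_of_nodup (PySem.Set.nodup_ofList _),
             List.toFinset_card_of_nodup (PySem.Set.nodup_ofList _)] at h1
      have hcond : ¬ (P ≠ [] ∧ ((PySem.Set.ofList P).length : Int) = ((PySem.Set.ofList cs).length : Int)) := by
        rintro ⟨_, habs⟩
        have : (PySem.Set.ofList P).length = (PySem.Set.ofList cs).length := by exact_mod_cast habs
        omega
      rw [peelLoop, dif_neg hcond]
    · -- m ≥ 2: every character survives with count reduced by one; recurse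
      have hm2 : 2 ≤ m := by omega
      have hall2 : ∀ d ∈ cs, 2 ≤ cs.count d := by
        intro d hd
        have := hlb' d hd
        have hc : (2 : Int) ≤ (cs.count d : Int) := le_trans hm2 this
        exact_mod_cast hc
      have hmemPiff : ∀ d, d ∈ P ↔ d ∈ cs := by
        intro d
        rw [mem_peel]
        constructor
        · intro h; exact List.count_pos_iff.mp (by omega)
        · exact hall2 d
      have hPne : P ≠ [] := by
        intro h0
        have : cstar ∈ P := (hmemPiff cstar).mpr hcstar_cs
        rw [h0] at this
        exact absurd this (List.not_mem_nil)
      have hsetlen : (PySem.Set.ofList P).length = (PySem.Set.ofList cs).length := by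
        have hperm : (PySem.Set.ofList P).Perm (PySem.Set.ofList cs) := by
          rw [List.perm_ext_iff_of_nodup (PySem.Set.nodup_ofList _) (PySem.Set.nodup_ofList _)]
          intro a
          rw [PySem.Set.mem_ofList, PySem.Set.mem_ofList, hmemPiff]
        exact hperm.length_eq
      -- the new minimum is m - 1
      have hPcount : ∀ d ∈ cs, (P.count d : Int) = (cs.count d : Int) - 1 := by
        intro d hd
        rw [count_peel, if_pos hd]
        have := List.count_pos_iff.mpr hd
        push_cast [Nat.cast_sub (by omega : 1 ≤ cs.count d)]
        ring
      have hPne' : (PySem.Set.ofList P).map (fun c => (P.count c : Int)) ≠ [] := by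
        simp only [ne_eq, List.map_eq_nil_iff]
        intro h0
        have : cstar ∈ PySem.Set.ofList P := (PySem.Set.mem_ofList _ _).mpr ((hmemPiff cstar).mpr hcstar_cs)
        rw [h0] at this
        exact absurd this (List.not_mem_nil)
      cases hmin' : PySem.List.min? ((PySem.Set.ofList P).map (fun c => (P.count c : Int))) (fun x => x) with
      | none =>
        exact absurd ((PySem.List.min?_eq_none_iff _ _).mp hmin')
          (fun h => hPne' (by rw [h]))
      | some m' =>
        have hm'mem := PySem.List.min?_mem hmin'
        rcases List.mem_map.mp hm'mem with ⟨c', hc', hm'val⟩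
        have hc'cs : c' ∈ cs := (hmemPiff c').mp ((PySem.Set.mem_ofList _ _).mp hc')
        have hm'ge : m - 1 ≤ m' := by
          rw [← hm'val, hPcount c' hc'cs]
          have := hlb' c' hc'cs
          omega
        have hm'le : m' ≤ m - 1 := by
          have hcsP : cstar ∈ PySem.Set.ofList P :=
            (PySem.Set.mem_ofList _ _).mpr ((hmemPiff cstar).mpr hcstar_cs)
          have h := PySem.List.min?_isMin hmin' _
            (List.mem_map.mpr ⟨cstar, hcsP, rfl⟩)
          rw [hPcount cstar hcstar_cs, hmval] at h
          omega
        have hm' : m' = m - 1 := le_antisymm hm'le hm'ge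
        have := ih P (by omega : P.length ≤ N) hPne m' (r + 1) hmin'
        rw [hsetlen] at this
        rw [this, hm']
        ring

-- Counter(s).values() is the frequency of each distinct character, in first-occurrence order
theorem counter_values_eq (l : List Char) :
    (PySem.Dict.counter l).values = (PySem.Set.ofList l).map (fun c => (l.count c : Int)) := by
  simp [PySem.Dict.values, PySem.Dict.items_counter, List.map_map, Function.comp]

-- folding min over elements that are all ≥ the accumulator leaves it unchanged
theorem foldl_min_fix (vl : List Int) (m0 : Int) (h : ∀ x ∈ vl, m0 ≤ x) :
    vl.foldl (fun acc x => min x acc) m0 = m0 := by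
  induction vl with
  | nil => rfl
  | cons x t ih =>
      have hx : m0 ≤ x := h x (List.mem_cons_self)
      simp only [List.foldl_cons, min_eq_right hx]
      exact ih (fun y hy => h y (List.mem_cons_of_mem _ hy))

-- ===== VERDICT (by name: the statements are the Claim_ definitions above) =====
theorem equality_spec : Claim_equal_equality := by
  intro s n k _ hpre
  unfold Spec_equality
  match s with
  | none => rfl
  | some str =>
    simp only [equality, equality_alt]
    by_cases hk : ((PySem.Set.ofList str.toList).length : Int) = k
    · by_cases hnil : str.toList = []
      · exfalso
        apply hpre
        exact ⟨congrArg some (String.toList_eq_nil_iff.mp hnil), by rw [← hk, hnil]; rfl⟩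
      · rw [if_neg (fun h => h hk), if_neg (fun h => h hk)]
        have hvl := counter_values_eq str.toList
        have hvlne : (PySem.Dict.counter str.toList).values ≠ [] := by
          rw [hvl]
          simp only [ne_eq, List.map_eq_nil_iff]
          intro hofl
          rcases List.exists_mem_of_ne_nil _ hnil with ⟨a, ha⟩
          have : a ∈ PySem.Set.ofList str.toList := (PySem.Set.mem_ofList _ _).mpr ha
          rw [hofl] at this
          exact absurd this (List.not_mem_nil)
        cases hm : PySem.List.min? ((PySem.Dict.counter str.toList).values) (fun x => x) with
        | none => exact absurd ((PySem.List.min?_eq_none_iff _ _).mp hm) hvlne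
        | some m0 =>
          have hloop : peelLoop str.toList k 0 = 0 + m0 := by
            rw [← hk]
            exact peelLoop_eq str.toList.length str.toList (le_refl _) hnil m0 0
              (by rw [← hvl]; exact hm)
          have hA : (PySem.List.pyRange 0 k).foldl
              (fun m i => min (PySem.List.pyGetD ((PySem.Dict.counter str.toList).values) i 0) m) m0 = m0 := by
            have hklen : k = PySem.List.len ((PySem.Dict.counter str.toList).values) := by
              rw [← hk, hvl]
              simp [PySem.List.len, List.length_map]
            rw [hklen]
            rw [PySem.List.foldl_pyRange_pyGetD ((PySem.Dict.counter str.toList).values) 0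
              (fun acc x => min x acc) m0 (le_refl 0)]
            rw [Int.toNat_zero, List.drop_zero]
            exact foldl_min_fix _ _ (fun x hx => PySem.List.min?_isMin hm x hx)
          show (PySem.List.pyRange 0 k).foldl
              (fun m i => min (PySem.List.pyGetD ((PySem.Dict.counter str.toList).values) i 0) m) m0 * k
            = peelLoop str.toList k 0 * k
          rw [hA, hloop]
          ring
    · rw [if_pos hk, if_pos hk]
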